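-- pv_equiv track=rewrite | github.com/mmk1209/PDDL_NL_PLAN_VALIDATOR | problem_validation/test_planner_repair.py | summarize_planner_error
-- ===== SOURCE A (Python) =====
-- def summarize_planner_error(output: str) -> str:
--     """
--     Extract only the most relevant error lines and nearby context
--     from fast-downward output for LLM repair.
--     """
--     lines = [l.rstrip() for l in output.splitlines() if l.strip()]
--     key_idx = []
--
--     keywords = ["error", "fatal", "duplicate", "undefined", "unknown", "failed"]
--
--     for i, line in enumerate(lines):
--         ll = line.lower()
--         if any(k in ll for k in keywords):
--             key_idx.append(i)
--
--     picked = []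
--     for i in key_idx:
--         # take 1 line before and after for context
--         for j in range(max(0, i - 1), min(len(lines), i + 2)):
--             picked.append(lines[j])
--
--     if not picked:
--         # fallback: last few lines
--         picked = lines[-6:]
--
--     # deduplicate while preserving order
--     seen = set()
--     summary = []
--     for l in picked:
--         if l not in seen:
--             seen.add(l)
--             summary.append(l)
--
--     return "\n".join(summary)
-- ===== SOURCE B (Python) =====
-- def summarize_planner_error(output: str) -> str:
--     lines = [l.rstrip() for l in output.splitlines() if l.strip()]
--     kws = ("error", "fatal", "duplicate", "undefined", "unknown", "failed")
--     flags = [any(k in l.lower() for k in kws) for l in lines]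
--     n = len(lines)
--     picked = [lines[i] for i in range(n)
--               if flags[i] or (i > 0 and flags[i - 1]) or (i + 1 < n and flags[i + 1])]
--     if not picked:
--         picked = lines[-6:]
--     return "\n".join(dict.fromkeys(picked))
-- ===== Notes on version B (the rewrite author's own statement) =====
-- stated objective: simpler
-- what changed: Replaces the key-index list plus per-key context windows and the explicit seen-set dedup loop by one flags list, a single index-filter pass keeping lines whose neighbourhood contains a keyword, and dict.fromkeys for ordered dedup.
import Mathlib
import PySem

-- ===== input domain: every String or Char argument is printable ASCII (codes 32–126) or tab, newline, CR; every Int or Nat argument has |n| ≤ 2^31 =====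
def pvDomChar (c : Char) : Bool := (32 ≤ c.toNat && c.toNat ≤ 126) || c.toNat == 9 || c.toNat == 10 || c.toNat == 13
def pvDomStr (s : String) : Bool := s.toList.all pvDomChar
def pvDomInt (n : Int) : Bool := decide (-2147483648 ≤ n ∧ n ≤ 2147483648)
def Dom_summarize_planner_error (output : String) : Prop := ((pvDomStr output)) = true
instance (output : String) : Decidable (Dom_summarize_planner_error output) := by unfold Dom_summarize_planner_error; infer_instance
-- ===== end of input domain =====

-- B replaces A's key-index list + per-key context windows + explicit seen-set dedup loop by a flags
-- list, one index-filter pass, and dict.fromkeys ordered dedup (objective: simpler; same return value).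

-- helpers shared by both Pythons verbatim: the filtered/rstripped line list and the keyword test
def pvLines (output : String) : List String :=
  ((PySem.Str.splitlines output).filter (fun l => PySem.Str.len (PySem.Str.strip l) != 0)).map
    PySem.Str.rstrip

def pvHit (l : String) : Bool :=
  ["error", "fatal", "duplicate", "undefined", "unknown", "failed"].any
    (fun k => PySem.Str.isIn k (PySem.Str.lower l))

-- ===== PORT A =====
def summarize_planner_error (output : String) : String :=
  let lines := pvLines output
  let key_idx : List Int :=
    (PySem.List.enumerate lines).foldl
      (fun acc p => if pvHit p.2 then acc ++ [p.1] else acc) []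
  let picked : List String :=
    key_idx.foldl
      (fun acc i =>
        (PySem.List.pyRange (max 0 (i - 1)) (min (lines.length : Int) (i + 2))).foldl
          (fun acc2 j => acc2 ++ [PySem.List.pyGetD lines j ""]) acc) []
  let picked := if picked.isEmpty then PySem.List.slice lines (some (-6)) none else picked
  let st :=
    picked.foldl
      (fun (st : PySem.Set String × List String) l =>
        if PySem.Set.contains st.1 l then st else (PySem.Set.add st.1 l, st.2 ++ [l]))
      (PySem.Set.empty, [])
  PySem.Str.join "\n" st.2

-- ===== PORT B =====
def summarize_planner_error_alt (output : String) : String :=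
  let lines := pvLines output
  let flags : List Bool := lines.map pvHit
  let n : Int := lines.length
  let picked : List String :=
    ((PySem.List.pyRange 0 n).filter (fun i =>
        PySem.List.pyGetD flags i false
        || (decide (0 < i) && PySem.List.pyGetD flags (i - 1) false)
        || (decide (i + 1 < n) && PySem.List.pyGetD flags (i + 1) false))).map
      (fun i => PySem.List.pyGetD lines i "")
  let picked := if picked.isEmpty then PySem.List.slice lines (some (-6)) none else picked
  PySem.Str.join "\n" (PySem.List.dedup picked)

-- ===== PRECONDITION & SPEC =====
def Spec_summarize_planner_error (output : String) (out : String) : Prop := out = summarize_planner_error_alt output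
instance (output : String) (out : String) : Decidable (Spec_summarize_planner_error output out) := by unfold Spec_summarize_planner_error; infer_instance

-- ===== CLAIM (what is proved, stated in full; the proofs are below) =====
def Claim_equal_summarize_planner_error : Prop := ∀ (output : String), Dom_summarize_planner_error output → Spec_summarize_planner_error output (summarize_planner_error output)

-- ===== LEMMAS AND PROOFS =====

-- the context window of key index i, as in A's inner loop
def pvWin (n i : Int) : List Int := PySem.List.pyRange (max 0 (i - 1)) (min n (i + 2))

-- A's key_idx in closed form
def pvKeys (lines : List String) : List Int :=
  ((PySem.List.enumerate lines).filter (fun p => pvHit p.2)).map Prod.fst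

-- canonical keep-predicate: index i lies in the window of some key
def pvKeepP (lines : List String) (i : Int) : Bool :=
  decide (∃ j ∈ pvKeys lines, max 0 (j - 1) ≤ i ∧ i < min (lines.length : Int) (j + 2))

lemma pvPyRange_sorted (a b : Int) : (PySem.List.pyRange a b).Pairwise (· < ·) := by
  by_cases h : a < b
  · rw [PySem.List.pyRange_one_cons h]
    exact List.Pairwise.cons
      (fun y hy => by have := PySem.List.mem_pyRange_one.mp hy; omega)
      (pvPyRange_sorted (a + 1) b)
  · have he : PySem.List.pyRange a b = [] :=
      List.eq_nil_iff_forall_not_mem.mpr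
        (fun x hx => by have := PySem.List.mem_pyRange_one.mp hx; omega)
    simp [he]
  termination_by (b - a).toNat
  decreasing_by omega

lemma pvUpdate_eq_append_filter {α : Type} [BEq α] [LawfulBEq α] :
    ∀ (l : List α) (s : PySem.Set α), l.Nodup →
      PySem.Set.update s l = s ++ l.filter (fun x => !(PySem.Set.contains s x)) := by
  intro l
  induction l with
  | nil => intro s _; simp [PySem.Set.update]
  | cons x l ih =>
    intro s hn
    have hstep : PySem.Set.update s (x :: l) = PySem.Set.update (PySem.Set.add s x) l := rfl
    by_cases hx : x ∈ s
    · have hc : PySem.Set.contains s x = true := (PySem.Set.contains_iff s x).mpr hx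
      rw [hstep, PySem.Set.add_of_mem hx, ih s hn.of_cons]
      simp [hx]
    · have hc : PySem.Set.contains s x = false := by
        rw [← Bool.not_eq_true, PySem.Set.contains_iff]; exact hx
      rw [hstep, PySem.Set.add_of_not_mem hx, ih (s ++ [x]) hn.of_cons]
      have hx' : x ∉ l := (List.nodup_cons.mp hn).1
      have hcongr : l.filter (fun y => !(PySem.Set.contains (s ++ [x]) y)) =
          l.filter (fun y => !(PySem.Set.contains s y)) := by
        apply List.filter_congr
        intro y hy
        have hne : y ≠ x := fun h => hx' (h ▸ hy)
        have h1 : PySem.Set.contains (s ++ [x]) y = PySem.Set.contains s y := by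
          rw [Bool.eq_iff_iff, PySem.Set.contains_iff, PySem.Set.contains_iff, List.mem_append]
          simp [hne]
        rw [h1]
      rw [hcongr]
      simp [hx]

lemma pvSorted_ext : ∀ (l₁ l₂ : List Int), l₁.Pairwise (· < ·) → l₂.Pairwise (· < ·) →
    (∀ x, x ∈ l₁ ↔ x ∈ l₂) → l₁ = l₂ := by
  intro l₁
  induction l₁ with
  | nil =>
    intro l₂ _ _ h
    cases l₂ with
    | nil => rfl
    | cons b t => exact absurd ((h b).mpr (List.mem_cons_self)) (by simp)
  | cons a t ih =>
    intro l₂ h1 h2 h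
    cases l₂ with
    | nil => exact absurd ((h a).mp (List.mem_cons_self)) (by simp)
    | cons b t₂ =>
      have hab : a = b := by
        rcases List.mem_cons.mp ((h a).mp List.mem_cons_self) with h' | h'
        · exact h'
        · rcases List.mem_cons.mp ((h b).mpr List.mem_cons_self) with h'' | h''
          · exact h''.symm
          · have hba : b < a := (List.pairwise_cons.mp h2).1 a h'
            have hab : a < b := (List.pairwise_cons.mp h1).1 b h''
            omega
      subst hab
      have htails : ∀ x, x ∈ t ↔ x ∈ t₂ := by
        intro x
        constructor
        · intro hx
          have hax : a < x := (List.pairwise_cons.mp h1).1 x hx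
          rcases List.mem_cons.mp ((h x).mp (List.mem_cons_of_mem a hx)) with h' | h'
          · omega
          · exact h'
        · intro hx
          have hax : a < x := (List.pairwise_cons.mp h2).1 x hx
          rcases List.mem_cons.mp ((h x).mpr (List.mem_cons_of_mem a hx)) with h' | h'
          · omega
          · exact h'
      rw [ih t₂ (List.pairwise_cons.mp h1).2 (List.pairwise_cons.mp h2).2 htails]

-- first-occurrence dedup with an explicit seen accumulator (proof-side helper)
def pvDdI {α : Type} [BEq α] (T : List α) : List α → List α
  | [] => []
  | x :: xs => if PySem.Set.contains T x then pvDdI T xs else x :: pvDdI (T ++ [x]) xs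

lemma pvUpdate_eq_ddI {α : Type} [BEq α] [LawfulBEq α] :
    ∀ (xs : List α) (T : PySem.Set α), PySem.Set.update T xs = T ++ pvDdI T xs := by
  intro xs
  induction xs with
  | nil => intro T; simp [PySem.Set.update, pvDdI]
  | cons x xs ih =>
    intro T
    have hstep : PySem.Set.update T (x :: xs) = PySem.Set.update (PySem.Set.add T x) xs := rfl
    by_cases hx : x ∈ T
    · have hc : PySem.Set.contains T x = true := (PySem.Set.contains_iff T x).mpr hx
      rw [hstep, PySem.Set.add_of_mem hx, ih T]
      simp [pvDdI, hx]
    · have hc : PySem.Set.contains T x = false := by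
        rw [← Bool.not_eq_true, PySem.Set.contains_iff]; exact hx
      rw [hstep, PySem.Set.add_of_not_mem hx, ih (T ++ [x])]
      simp [pvDdI, hx]

lemma pvDedup_eq_ddI {α : Type} [BEq α] [LawfulBEq α] (xs : List α) :
    PySem.List.dedup xs = pvDdI [] xs := by
  have h : PySem.List.dedup xs = PySem.Set.update ([] : PySem.Set α) xs := rfl
  rw [h, pvUpdate_eq_ddI]
  simp

lemma pvUpdate_map_ddI {α β : Type} [BEq α] [LawfulBEq α] [BEq β] [LawfulBEq β] (f : α → β) :
    ∀ (xs : List α) (T : PySem.Set α) (S : PySem.Set β), (∀ x ∈ T, f x ∈ S) →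
      PySem.Set.update S ((pvDdI T xs).map f) = PySem.Set.update S (xs.map f) := by
  intro xs
  induction xs with
  | nil => intro T S _; simp [pvDdI]
  | cons x xs ih =>
    intro T S hTS
    by_cases hx : x ∈ T
    · have hc : PySem.Set.contains T x = true := (PySem.Set.contains_iff T x).mpr hx
      have hfx : f x ∈ S := hTS x hx
      have haddS : PySem.Set.add S (f x) = S := PySem.Set.add_of_mem hfx
      have hstep : PySem.Set.update S (f x :: xs.map f) =
          PySem.Set.update (PySem.Set.add S (f x)) (xs.map f) := rfl
      simp only [pvDdI, hc, if_pos, List.map_cons, hstep, haddS]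
      exact ih T S hTS
    · have hc : PySem.Set.contains T x = false := by
        rw [← Bool.not_eq_true, PySem.Set.contains_iff]; exact hx
      have hstep : ∀ (l : List β), PySem.Set.update S (f x :: l) =
          PySem.Set.update (PySem.Set.add S (f x)) l := fun _ => rfl
      simp only [pvDdI, hc, List.map_cons, hstep, Bool.false_eq_true, if_false]
      apply ih (T ++ [x]) (PySem.Set.add S (f x))
      intro y hy
      rcases List.mem_append.mp hy with hm | hm
      · exact (PySem.Set.mem_add S (f x) (f y)).mpr (Or.inl (hTS y hm))
      · simp at hm
        exact (PySem.Set.mem_add S (f x) (f y)).mpr (Or.inr (by rw [hm]))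

lemma pvDedup_map_dedup {α β : Type} [BEq α] [LawfulBEq α] [BEq β] [LawfulBEq β] (f : α → β)
    (xs : List α) :
    PySem.List.dedup ((PySem.List.dedup xs).map f) = PySem.List.dedup (xs.map f) := by
  have h1 : PySem.List.dedup ((PySem.List.dedup xs).map f) =
      PySem.Set.update ([] : PySem.Set β) ((PySem.List.dedup xs).map f) := rfl
  have h2 : PySem.List.dedup (xs.map f) =
      PySem.Set.update ([] : PySem.Set β) (xs.map f) := rfl
  rw [h1, h2, pvDedup_eq_ddI]
  exact pvUpdate_map_ddI f xs [] [] (by simp)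

lemma pvFoldlAdd_flatMap {α β : Type} [BEq β] (g : α → List β) :
    ∀ (ks : List α) (s : PySem.Set β),
      (ks.flatMap g).foldl PySem.Set.add s = ks.foldl (fun s k => PySem.Set.update s (g k)) s := by
  intro ks
  induction ks with
  | nil => intro s; simp
  | cons k ks ih =>
    intro s
    rw [List.flatMap_cons, List.foldl_append, List.foldl_cons]
    exact ih (PySem.Set.update s (g k))

lemma pvWin_sorted (n i : Int) : (pvWin n i).Pairwise (· < ·) := pvPyRange_sorted _ _

lemma pvMem_win {n i x : Int} : x ∈ pvWin n i ↔ max 0 (i - 1) ≤ x ∧ x < min n (i + 2) :=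
  PySem.List.mem_pyRange_one

-- the sorted-merge invariant: folding window-updates over increasing keys keeps the set sorted
lemma pvUpdWin_sorted (n : Int) :
    ∀ (ks : List Int) (s : List Int) (m : Int),
      s.Pairwise (· < ·) →
      (∀ x ∈ s, 0 ≤ x ∧ x < n ∧ x ≤ m + 1) →
      (∀ w : Int, m - 1 ≤ w → w ≤ m + 1 → 0 ≤ w → w < n → w ∈ s) →
      ks.Pairwise (· < ·) → (∀ k ∈ ks, m < k ∧ 0 ≤ k ∧ k < n) →
      (ks.foldl (fun s k => PySem.Set.update s (pvWin n k)) s).Pairwise (· < ·) := by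
  intro ks
  induction ks with
  | nil => intro s m h1 _ _ _ _; simpa using h1
  | cons k ks ih =>
    intro s m h1 h2 h3 h4 h5
    obtain ⟨hmk, hk0, hkn⟩ := h5 k List.mem_cons_self
    have hwnd : (pvWin n k).Nodup :=
      (pvWin_sorted n k).imp (fun h => ne_of_lt h)
    have hupd : PySem.Set.update s (pvWin n k) =
        s ++ (pvWin n k).filter (fun x => !(PySem.Set.contains s x)) :=
      pvUpdate_eq_append_filter _ s hwnd
    rw [List.foldl_cons]
    apply ih (PySem.Set.update s (pvWin n k)) k
    · -- sortedness of the updated set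
      rw [hupd]
      apply List.pairwise_append.mpr
      refine ⟨h1, List.Pairwise.filter _ (pvWin_sorted n k), ?_⟩
      intro a ha b hb
      have hbw := List.mem_filter.mp hb
      have hbwin := pvMem_win.mp hbw.1
      have hbns : b ∉ s := by simpa using hbw.2
      have hbig : m + 1 < b := by
        by_contra hle
        exact hbns (h3 b (by omega) (by omega) (by omega) (by omega))
      have := h2 a ha
      omega
    · -- bounds
      intro x hx
      rcases (PySem.Set.mem_update s (pvWin n k) x).mp hx with hm | hm
      · have := h2 x hm; omega
      · have := pvMem_win.mp hm; omega
    · -- window of k is present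
      intro w hw1 hw2 hw3 hw4
      exact (PySem.Set.mem_update s (pvWin n k) w).mpr
        (Or.inr (pvMem_win.mpr (by omega)))
    · exact (List.pairwise_cons.mp h4).2
    · intro k' hk'
      have hlt : k < k' := (List.pairwise_cons.mp h4).1 k' hk'
      have := h5 k' (List.mem_cons_of_mem k hk')
      omega

-- the core: dedup of the concatenated windows IS the ordered filter of range(n)
lemma pvCore (n : Int) (ks : List Int) (hs : ks.Pairwise (· < ·))
    (hb : ∀ k ∈ ks, 0 ≤ k ∧ k < n) :
    PySem.List.dedup (ks.flatMap (pvWin n)) =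
      (PySem.List.pyRange 0 n).filter
        (fun i => decide (∃ j ∈ ks, max 0 (j - 1) ≤ i ∧ i < min n (j + 2))) := by
  apply pvSorted_ext
  · -- left side is sorted
    have h1 : PySem.List.dedup (ks.flatMap (pvWin n)) =
        (ks.flatMap (pvWin n)).foldl PySem.Set.add ([] : PySem.Set Int) := rfl
    rw [h1, pvFoldlAdd_flatMap]
    apply pvUpdWin_sorted n ks [] (-2)
    · simp
    · simp
    · intro w h1 h2 h3 h4; omega
    · exact hs
    · intro k hk; have := hb k hk; omega
  · exact List.Pairwise.filter _ (pvPyRange_sorted 0 n)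
  · intro x
    simp only [PySem.List.mem_dedup, List.mem_flatMap, List.mem_filter,
      PySem.List.mem_pyRange_one, decide_eq_true_eq]
    constructor
    · rintro ⟨j, hj, hw⟩
      have hwin := pvMem_win.mp hw
      have := hb j hj
      exact ⟨by omega, j, hj, by omega⟩
    · rintro ⟨hr, j, hj, hw⟩
      exact ⟨j, hj, pvMem_win.mpr (by omega)⟩

lemma pvDedup_eq_nil {α : Type} [BEq α] [LawfulBEq α] (xs : List α) :
    (PySem.List.dedup xs = []) ↔ xs = [] := by
  constructor
  · intro h
    apply List.eq_nil_iff_forall_not_mem.mpr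
    intro x hx
    have hmem : x ∈ PySem.List.dedup xs := (PySem.List.mem_dedup xs x).mpr hx
    rw [h] at hmem
    simp at hmem
  · intro h; subst h; rfl

-- A's seen-set loop is exactly ordered dedup
lemma pvA_dedup_aux (picked : List String) :
    ∀ s : PySem.Set String,
      picked.foldl
        (fun (st : PySem.Set String × List String) l =>
          if PySem.Set.contains st.1 l then st else (PySem.Set.add st.1 l, st.2 ++ [l])) (s, s)
      = (PySem.Set.update s picked, PySem.Set.update s picked) := by
  induction picked with
  | nil => intro s; simp [PySem.Set.update]
  | cons x picked ih =>
    intro s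
    rw [List.foldl_cons]
    by_cases hx : x ∈ s
    · have hc : PySem.Set.contains s x = true := (PySem.Set.contains_iff s x).mpr hx
      have hstep : PySem.Set.update s (x :: picked) = PySem.Set.update (PySem.Set.add s x) picked := rfl
      rw [hstep, PySem.Set.add_of_mem hx]
      simpa [hx] using ih s
    · have hc : PySem.Set.contains s x = false := by
        rw [← Bool.not_eq_true, PySem.Set.contains_iff]; exact hx
      have hadd : PySem.Set.add s x = s ++ [x] := PySem.Set.add_of_not_mem hx
      have hstep : PySem.Set.update s (x :: picked) = PySem.Set.update (PySem.Set.add s x) picked := rfl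
      rw [hstep, hadd]
      simpa [hx, hadd] using ih (s ++ [x])

lemma pvA_dedup (picked : List String) :
    (picked.foldl
        (fun (st : PySem.Set String × List String) l =>
          if PySem.Set.contains st.1 l then st else (PySem.Set.add st.1 l, st.2 ++ [l]))
        (PySem.Set.empty, [])).2
      = PySem.List.dedup picked := by
  have h : (PySem.Set.empty : PySem.Set String) = [] := rfl
  rw [h]
  rw [pvA_dedup_aux picked []]
  rfl

-- A's picked list in closed form
lemma pvPickedA (lines : List String) :
    (((PySem.List.enumerate lines).foldl
        (fun acc p => if pvHit p.2 then acc ++ [p.1] else acc) []).foldl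
      (fun acc i =>
        (PySem.List.pyRange (max 0 (i - 1)) (min (lines.length : Int) (i + 2))).foldl
          (fun acc2 j => acc2 ++ [PySem.List.pyGetD lines j ""]) acc) [])
    = ((pvKeys lines).flatMap (pvWin (lines.length : Int))).map
        (fun j => PySem.List.pyGetD lines j "") := by
  rw [PySem.List.foldl_append_if (fun p => pvHit p.2) Prod.fst]
  rw [List.nil_append]
  simp only [show ∀ i : Int,
      PySem.List.pyRange (max 0 (i - 1)) (min (lines.length : Int) (i + 2)) =
        pvWin (lines.length : Int) i from fun _ => rfl]
  rw [PySem.List.foldl_congr_mem' _ _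
    (fun acc i => acc ++ (pvWin (lines.length : Int) i).map (fun j => PySem.List.pyGetD lines j "")) _
    (fun i _ acc => PySem.List.foldl_append_singleton_eq_map _ _ acc)]
  rw [PySem.List.foldl_append_eq_flatMap]
  rw [List.nil_append, ← List.map_flatMap]
  rfl

-- keys are the indices of keyword lines
lemma pvMem_keys (lines : List String) (j : Int) :
    j ∈ pvKeys lines ↔
      ∃ k : Nat, ∃ h : k < lines.length, j = (k : Int) ∧ pvHit lines[k] = true := by
  simp only [pvKeys, List.mem_map, List.mem_filter, PySem.List.mem_enumerate_iff]
  constructor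
  · rintro ⟨p, ⟨⟨k, hk, hp⟩, hhit⟩, hfst⟩
    subst hp
    exact ⟨k, hk, by simpa using hfst.symm, by simpa using hhit⟩
  · rintro ⟨k, hk, hj, hhit⟩
    exact ⟨((k : Int), lines[k]), ⟨⟨k, hk, by simp⟩, by simpa using hhit⟩, by simp [hj]⟩

lemma pvKeys_sorted (lines : List String) : (pvKeys lines).Pairwise (· < ·) := by
  apply (List.pairwise_map).mpr
  exact List.Pairwise.filter _ (PySem.List.pairwise_lt_enumerate lines 0)

lemma pvKeys_bounds (lines : List String) :
    ∀ j ∈ pvKeys lines, 0 ≤ j ∧ j < (lines.length : Int) := by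
  intro j hj
  obtain ⟨k, hk, hj, _⟩ := (pvMem_keys lines j).mp hj
  omega

-- B's index test agrees with the canonical keep-predicate on range(n)
lemma pvKeep_eq (lines : List String) :
    ∀ i ∈ PySem.List.pyRange 0 (lines.length : Int),
      (PySem.List.pyGetD (lines.map pvHit) i false
        || (decide (0 < i) && PySem.List.pyGetD (lines.map pvHit) (i - 1) false)
        || (decide (i + 1 < (lines.length : Int)) &&
              PySem.List.pyGetD (lines.map pvHit) (i + 1) false))
      = pvKeepP lines i := by
  intro i hi
  obtain ⟨h0, hn⟩ := PySem.List.mem_pyRange_one.mp hi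
  have hget : ∀ (t : Int) (ht0 : 0 ≤ t) (htn : t < (lines.length : Int)),
      PySem.List.pyGetD (lines.map pvHit) t false =
        pvHit (lines[t.toNat]'(by omega)) := by
    intro t ht0 htn
    rw [PySem.List.pyGetD_eq_getElem (lines.map pvHit) false ht0 (by simpa using htn)]
    simp
  rw [Bool.eq_iff_iff]
  simp only [Bool.or_eq_true, Bool.and_eq_true, decide_eq_true_eq, pvKeepP]
  constructor
  · rintro ((hc | ⟨hgt, hc⟩) | ⟨hlt, hc⟩)
    · rw [hget i h0 hn] at hc
      exact ⟨(i.toNat : Int), (pvMem_keys lines _).mpr ⟨i.toNat, by omega, rfl, hc⟩, by omega⟩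
    · rw [hget (i - 1) (by omega) (by omega)] at hc
      exact ⟨((i - 1).toNat : Int), (pvMem_keys lines _).mpr ⟨(i - 1).toNat, by omega, rfl, hc⟩,
        by omega⟩
    · rw [hget (i + 1) (by omega) (by omega)] at hc
      exact ⟨((i + 1).toNat : Int), (pvMem_keys lines _).mpr ⟨(i + 1).toNat, by omega, rfl, hc⟩,
        by omega⟩
  · rintro ⟨j, hj, hwin⟩
    obtain ⟨k, hk, hjk, hhit⟩ := (pvMem_keys lines j).mp hj
    have hcases : j = i ∨ j = i - 1 ∨ j = i + 1 := by omega
    rcases hcases with h | h | h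
    · left; left
      rw [hget i h0 hn]
      have : i.toNat = k := by omega
      simp only [this]; exact hhit
    · left; right
      refine ⟨by omega, ?_⟩
      rw [hget (i - 1) (by omega) (by omega)]
      have : (i - 1).toNat = k := by omega
      simp only [this]; exact hhit
    · right
      refine ⟨by omega, ?_⟩
      rw [hget (i + 1) (by omega) (by omega)]
      have : (i + 1).toNat = k := by omega
      simp only [this]; exact hhit

-- ===== VERDICT (by name: the statement is the Claim_ definition above) =====
theorem summarize_planner_error_spec : Claim_equal_summarize_planner_error := by
  intro output _
  show summarize_planner_error output = summarize_planner_error_alt output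
  unfold summarize_planner_error summarize_planner_error_alt
  dsimp only
  generalize pvLines output = lines
  rw [pvA_dedup, pvPickedA]
  set pA := ((pvKeys lines).flatMap (pvWin (lines.length : Int))).map
      (fun j => PySem.List.pyGetD lines j "") with hpA
  set pB := ((PySem.List.pyRange 0 (lines.length : Int)).filter (fun i =>
      PySem.List.pyGetD (List.map pvHit lines) i false
      || (decide (0 < i) && PySem.List.pyGetD (List.map pvHit lines) (i - 1) false)
      || (decide (i + 1 < (lines.length : Int)) &&
            PySem.List.pyGetD (List.map pvHit lines) (i + 1) false))).map
      (fun i => PySem.List.pyGetD lines i "") with hpB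
  have hPP : PySem.List.dedup pA = PySem.List.dedup pB := by
    rw [hpA, hpB, List.filter_congr (pvKeep_eq lines)]
    rw [← pvDedup_map_dedup (fun j => PySem.List.pyGetD lines j "")
      ((pvKeys lines).flatMap (pvWin (lines.length : Int)))]
    rw [pvCore (lines.length : Int) (pvKeys lines) (pvKeys_sorted lines) (pvKeys_bounds lines)]
    rfl
  have hE : pA.isEmpty = pB.isEmpty := by
    rw [Bool.eq_iff_iff, List.isEmpty_iff, List.isEmpty_iff,
      ← pvDedup_eq_nil pA, ← pvDedup_eq_nil pB, hPP]
  rw [hE]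
  by_cases hc : pB.isEmpty = true
  · rw [if_pos hc, if_pos hc]
  · rw [if_neg hc, if_neg hc]
    exact congrArg _ hPP
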